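-- pv_equiv track=rewrite | github.com/ceastld/alg | leetcode/hot200/backtracking/h40.ans.py | combinationSum2_dp
-- ===== SOURCE A (Python) =====
-- from typing import List
--
-- def combinationSum2_dp(candidates: List[int], target: int) -> List[List[int]]:
--     """
--     动态规划解法：背包问题
--
--     解题思路：
--     1. 将问题转化为背包问题
--     2. 使用动态规划计算所有可能的组合
--     3. 使用回溯重构解
--
--     时间复杂度：O(n * target)
--     空间复杂度：O(n * target)
--     """
--     candidates.sort()
--     result = []
--
--     def backtrack(start: int, current_sum: int, current_path: List[int]):
--         if current_sum == target:
--             result.append(current_path[:])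
--             return
--
--         if current_sum > target:
--             return
--
--         for i in range(start, len(candidates)):
--             # 去重
--             if i > start and candidates[i] == candidates[i-1]:
--                 continue
--
--             # 剪枝
--             if current_sum + candidates[i] > target:
--                 break
--
--             current_path.append(candidates[i])
--             backtrack(i + 1, current_sum + candidates[i], current_path)
--             current_path.pop()
--
--     backtrack(0, 0, [])
--     return result
-- ===== SOURCE B (Python) =====
-- from typing import List
--
-- def combinationSum2_dp(candidates: List[int], target: int) -> List[List[int]]:
--     # Pure-functional binary include/exclude recursion over the sorted candidates;
--     # sorts candidates in place like the original.
--     candidates.sort()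
--     n = len(candidates)
--
--     def solve(i: int, remain: int) -> List[List[int]]:
--         if remain == 0:
--             return [[]]
--         if remain < 0 or i == n or candidates[i] > remain:
--             return []
--         c = candidates[i]
--         with_c = [[c] + rest for rest in solve(i + 1, remain - c)]
--         j = i + 1
--         while j < n and candidates[j] == c:
--             j += 1
--         return with_c + solve(j, remain)
--
--     return solve(0, target)
-- ===== Notes on version B (the rewrite author's own statement) =====
-- stated objective: alternative
-- what changed: Replaces the start-indexed for-loop backtracking over shared mutable path/result lists by a pure binary include/exclude recursion that returns the list of combinations directly (include candidates[i] first, then skip all its duplicates for the exclude branch).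
import Mathlib
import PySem

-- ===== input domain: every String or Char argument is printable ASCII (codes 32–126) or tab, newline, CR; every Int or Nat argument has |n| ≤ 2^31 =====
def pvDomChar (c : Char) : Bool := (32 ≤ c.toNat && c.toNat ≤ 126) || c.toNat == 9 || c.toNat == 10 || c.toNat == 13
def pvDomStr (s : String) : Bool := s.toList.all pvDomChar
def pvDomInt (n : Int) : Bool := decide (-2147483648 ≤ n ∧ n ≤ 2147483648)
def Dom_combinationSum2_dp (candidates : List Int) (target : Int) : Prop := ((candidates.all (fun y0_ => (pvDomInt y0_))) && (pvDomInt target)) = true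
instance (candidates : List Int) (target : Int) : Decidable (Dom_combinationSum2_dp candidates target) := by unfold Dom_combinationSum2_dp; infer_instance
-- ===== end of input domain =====

-- B replaces A's shared mutable path/result backtracking for-loop by a pure binary
-- include/exclude recursion returning the list of combinations (objective: alternative).
-- Both A and B sort `candidates` in place; the equivalence proved is about the return value.

-- ===== PORT A =====
-- The inner `backtrack` (btA) and its for-loop (loopA), transliterated; `res` is the
-- mutable `result` threaded through. Indices guarded in range, so List.getD's default
-- is never used (Python would raise OOB, which is unreachable here).
mutual
def btA (cs : List Int) (target : Int) (start : Nat) (sum : Int) (path : List Int)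
    (res : List (List Int)) : List (List Int) :=
  if sum = target then res ++ [path]
  else if sum > target then res
  else loopA cs target start sum path start res
termination_by 2 * (cs.length - start) + 2
decreasing_by all_goals omega
def loopA (cs : List Int) (target : Int) (start : Nat) (sum : Int) (path : List Int)
    (i : Nat) (res : List (List Int)) : List (List Int) :=
  if _h : i < cs.length then
    if start < i ∧ cs.getD i 0 = cs.getD (i-1) 0 then       -- 去重 (continue)
      loopA cs target start sum path (i+1) res
    else if sum + cs.getD i 0 > target then res             -- 剪枝 (break)
    else
      loopA cs target start sum path (i+1)
        (btA cs target (i+1) (sum + cs.getD i 0) (path ++ [cs.getD i 0]) res)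
  else res
termination_by 2 * (cs.length - i) + 1
decreasing_by all_goals omega
end

def combinationSum2_dp (candidates : List Int) (target : Int) : List (List Int) :=
  btA (PySem.List.sorted candidates (fun x => x) false) target 0 0 [] []

-- ===== PORT B =====
-- the `while j < n and candidates[j] == c: j += 1` loop
def skipEq (cs : List Int) (c : Int) (j : Nat) : Nat :=
  if j < cs.length ∧ cs.getD j 0 = c then skipEq cs c (j+1) else j
termination_by cs.length - j
decreasing_by omega

theorem skipEq_ge (cs : List Int) (c : Int) (j : Nat) : j ≤ skipEq cs c j := by
  unfold skipEq
  split
  · exact Nat.le_trans (Nat.le_succ j) (skipEq_ge cs c (j+1))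
  · exact Nat.le_refl j
termination_by cs.length - j
decreasing_by omega

def solveB (cs : List Int) (i : Nat) (remain : Int) : List (List Int) :=
  if remain = 0 then [[]]
  else if remain < 0 ∨ i = cs.length ∨ cs.getD i 0 > remain then []
  else if _h : i < cs.length then
    let c := cs.getD i 0
    ((solveB cs (i+1) (remain - c)).map (fun rest => c :: rest))
      ++ solveB cs (skipEq cs c (i+1)) remain
  else []  -- unreachable: i ≤ cs.length always, and i = cs.length was excluded above
termination_by cs.length - i
decreasing_by
  · omega
  · have := skipEq_ge cs (cs.getD i 0) (i+1); omega

def combinationSum2_dp_alt (candidates : List Int) (target : Int) : List (List Int) :=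
  solveB (PySem.List.sorted candidates (fun x => x) false) 0 target

-- ===== PRECONDITION & SPEC =====
def Spec_combinationSum2_dp (candidates : List Int) (target : Int) (out : List (List Int)) : Prop := out = combinationSum2_dp_alt candidates target
instance (candidates : List Int) (target : Int) (out : List (List Int)) : Decidable (Spec_combinationSum2_dp candidates target out) := by unfold Spec_combinationSum2_dp; infer_instance

-- ===== CLAIM (what is proved, stated in full; the proofs are below) =====
def Claim_equal_combinationSum2_dp : Prop := ∀ (candidates : List Int) (target : Int), Dom_combinationSum2_dp candidates target → Spec_combinationSum2_dp candidates target (combinationSum2_dp candidates target)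

-- ===== LEMMAS AND PROOFS =====

-- solveB on an index at/after the end with positive remain yields no solutions
theorem solveB_oob (cs : List Int) (i : Nat) (remain : Int)
    (hr : 0 < remain) (hi : cs.length ≤ i) : solveB cs i remain = [] := by
  rw [solveB, if_neg (by omega)]
  by_cases h : i = cs.length
  · rw [if_pos (Or.inr (Or.inl h))]
  · rw [if_neg ?_, dif_neg (by omega)]
    push Not
    exact ⟨by omega, h, by rw [List.getD_eq_default _ _ (by omega)]; omega⟩

-- Combined invariant, by strong induction on the shared termination measure d:
-- (hB) for i past start, the remaining for-loop iterations of A equal B's solveB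
--      restarted at the first index whose value differs from cs[i-1] (B's while-skip);
-- (hC) the full for-loop from start equals solveB at start;
-- (hA) backtrack start sum = B's solutions for remain = target - sum, appended to res.
theorem main_inv (cs : List Int) (target : Int) (d : Nat) :
    (∀ i sum path (res : List (List Int)) start, 2 * (cs.length - i) + 1 ≤ d → start < i → sum < target →
      loopA cs target start sum path i res
        = res ++ (solveB cs (skipEq cs (cs.getD (i-1) 0) i) (target - sum)).map
            (fun r => path ++ r))
    ∧ (∀ start sum path (res : List (List Int)), 2 * (cs.length - start) + 1 ≤ d → sum < target →
      loopA cs target start sum path start res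
        = res ++ (solveB cs start (target - sum)).map (fun r => path ++ r))
    ∧ (∀ start sum path (res : List (List Int)), 2 * (cs.length - start) + 2 ≤ d →
      btA cs target start sum path res
        = res ++ (solveB cs start (target - sum)).map (fun r => path ++ r)) := by
  induction d using Nat.strong_induction_on with
  | _ d IH =>
    have hB : ∀ i sum path (res : List (List Int)) start, 2 * (cs.length - i) + 1 ≤ d → start < i → sum < target →
        loopA cs target start sum path i res
          = res ++ (solveB cs (skipEq cs (cs.getD (i-1) 0) i) (target - sum)).map
              (fun r => path ++ r) := by
      intro i sum path res start hle hsi hst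
      rw [loopA]
      by_cases h : i < cs.length
      · rw [dif_pos h]
        by_cases hdup : cs.getD i 0 = cs.getD (i-1) 0
        · rw [if_pos ⟨hsi, hdup⟩]
          have hskip : skipEq cs (cs.getD (i-1) 0) i = skipEq cs (cs.getD (i-1) 0) (i+1) := by
            rw [skipEq, if_pos ⟨h, hdup⟩]
          rw [hskip, ← hdup]
          have := (IH (d-1) (by omega)).1 (i+1) sum path res start (by omega) (by omega) hst
          simpa using this
        · rw [if_neg (by tauto)]
          have hskip : skipEq cs (cs.getD (i-1) 0) i = i := by
            rw [skipEq, if_neg (by tauto)]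
          rw [hskip]
          by_cases hbr : sum + cs.getD i 0 > target
          · rw [if_pos hbr, solveB, if_neg (by omega), if_pos (by right; right; omega)]
            simp
          · rw [if_neg hbr]
            rw [solveB, if_neg (by omega), if_neg (by push Not; refine ⟨by omega, by omega, by omega⟩),
              dif_pos h]
            have hA' := (IH (d-1) (by omega)).2.2 (i+1) (sum + cs.getD i 0) (path ++ [cs.getD i 0]) res (by omega)
            have hB' := (IH (d-1) (by omega)).1 (i+1) sum path
              (btA cs target (i+1) (sum + cs.getD i 0) (path ++ [cs.getD i 0]) res) start (by omega) (by omega) hst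
            rw [hB', hA']
            have : target - (sum + cs.getD i 0) = target - sum - cs.getD i 0 := by omega
            rw [this]
            simp [List.map_map, Function.comp]
      · rw [dif_neg h]
        have hskip : skipEq cs (cs.getD (i-1) 0) i = i := by
          rw [skipEq, if_neg (by tauto)]
        rw [hskip, solveB_oob cs i _ (by omega) (by omega)]
        simp
    have hC : ∀ start sum path (res : List (List Int)), 2 * (cs.length - start) + 1 ≤ d → sum < target →
        loopA cs target start sum path start res
          = res ++ (solveB cs start (target - sum)).map (fun r => path ++ r) := by
      intro start sum path res hle hst
      rw [loopA]
      by_cases h : start < cs.length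
      · rw [dif_pos h, if_neg (by simp)]
        by_cases hbr : sum + cs.getD start 0 > target
        · rw [if_pos hbr, solveB, if_neg (by omega), if_pos (by right; right; omega)]
          simp
        · rw [if_neg hbr]
          rw [solveB, if_neg (by omega), if_neg (by push Not; refine ⟨by omega, by omega, by omega⟩),
            dif_pos h]
          have hA' := (IH (d-1) (by omega)).2.2 (start+1) (sum + cs.getD start 0) (path ++ [cs.getD start 0]) res (by omega)
          have hB' := hB (start+1) sum path
            (btA cs target (start+1) (sum + cs.getD start 0) (path ++ [cs.getD start 0]) res) start (by omega) (by omega) hst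
          rw [hB', hA']
          simp only [Nat.add_sub_cancel]
          have : target - (sum + cs.getD start 0) = target - sum - cs.getD start 0 := by omega
          rw [this]
          simp [List.map_map, Function.comp]
      · rw [dif_neg h, solveB_oob cs start _ (by omega) (by omega)]
        simp
    refine ⟨hB, hC, ?_⟩
    intro start sum path res hle
    rw [btA]
    by_cases h0 : sum = target
    · rw [if_pos h0, solveB, if_pos (by omega)]
      simp
    · rw [if_neg h0]
      by_cases h1 : sum > target
      · rw [if_pos h1, solveB, if_neg (by omega), if_pos (by left; omega)]
        simp
      · rw [if_neg h1]
        exact hC start sum path res (by omega) (by omega)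

-- ===== VERDICT (by name: the statement is the Claim_ definition above) =====
theorem combinationSum2_dp_spec : Claim_equal_combinationSum2_dp := by
  intro candidates target _
  unfold Spec_combinationSum2_dp combinationSum2_dp combinationSum2_dp_alt
  have h := (main_inv (PySem.List.sorted candidates (fun x => x) false) target
      (2 * (PySem.List.sorted candidates (fun x => x) false).length + 2)).2.2
      0 0 [] [] (by omega)
  simpa using h
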